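-- pv_equiv track=rewrite | github.com/maskofsin/Visual-Novel-Creator-for-Wonderswan | runtime/tools/convert_json.py | _cluster_tile_averages
-- ===== SOURCE A (Python) =====
-- def _cluster_tile_averages(tile_avgs: list[tuple[int, int, int]], k: int) -> list[int]:
--     if not tile_avgs:
--         return []
--     k = max(1, min(k, len(tile_avgs)))
--     ordered = sorted(tile_avgs, key=lambda c: c[0] + c[1] + c[2])
--     centers = [ordered[(i * (len(ordered) - 1)) // max(1, k - 1)] for i in range(k)]
--     groups = [0] * len(tile_avgs)
--     for _ in range(8):
--         buckets = [[] for _ in range(k)]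
--         for idx, c in enumerate(tile_avgs):
--             best = min(range(k), key=lambda i: sum((c[j] - centers[i][j]) * (c[j] - centers[i][j]) for j in range(3)))
--             groups[idx] = best
--             buckets[best].append(c)
--         for i, bucket in enumerate(buckets):
--             if bucket:
--                 centers[i] = tuple(sum(c[j] for c in bucket) // len(bucket) for j in range(3))
--     return groups
-- ===== SOURCE B (Python) =====
-- def _cluster_tile_averages(tile_avgs: list[tuple[int, int, int]], k: int) -> list[int]:
--     if not tile_avgs:
--         return []
--     k = max(1, min(k, len(tile_avgs)))
--     ordered = sorted(tile_avgs, key=lambda c: c[0] + c[1] + c[2])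
--     centers = [ordered[(i * (len(ordered) - 1)) // max(1, k - 1)] for i in range(k)]
--
--     # index the data once: distinct colors with multiplicities (insertion order)
--     counts = {}
--     for c in tile_avgs:
--         counts[c] = counts.get(c, 0) + 1
--
--     def nearest(c, cs):
--         best = 0
--         bd = (c[0] - cs[0][0]) ** 2 + (c[1] - cs[0][1]) ** 2 + (c[2] - cs[0][2]) ** 2
--         for i in range(1, k):
--             d = (c[0] - cs[i][0]) ** 2 + (c[1] - cs[i][1]) ** 2 + (c[2] - cs[i][2]) ** 2
--             if d < bd:
--                 best, bd = i, d
--         return best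
--
--     # 7 weighted Lloyd updates over the distinct colors only
--     for _ in range(7):
--         sums = [(0, 0, 0, 0)] * k
--         for c, m in counts.items():
--             b = nearest(c, centers)
--             s = sums[b]
--             sums[b] = (s[0] + c[0] * m, s[1] + c[1] * m, s[2] + c[2] * m, s[3] + m)
--         centers = [
--             (s[0] // s[3], s[1] // s[3], s[2] // s[3]) if s[3] else centers[i]
--             for i, s in enumerate(sums)
--         ]
--     # final assignment pass (what A's 8th iteration writes into groups)
--     return [nearest(c, centers) for c in tile_avgs]
-- ===== Notes on version B (the rewrite author's own statement) =====
-- stated objective: faster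
-- what changed: B builds a counter dict of distinct colors once and runs the center updates as weighted Lloyd steps over the distinct colors only (multiplying channel sums by multiplicities), then produces the labels in a single final assignment pass instead of maintaining per-iteration bucket lists and a groups array across all 8 iterations.
import Mathlib
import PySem

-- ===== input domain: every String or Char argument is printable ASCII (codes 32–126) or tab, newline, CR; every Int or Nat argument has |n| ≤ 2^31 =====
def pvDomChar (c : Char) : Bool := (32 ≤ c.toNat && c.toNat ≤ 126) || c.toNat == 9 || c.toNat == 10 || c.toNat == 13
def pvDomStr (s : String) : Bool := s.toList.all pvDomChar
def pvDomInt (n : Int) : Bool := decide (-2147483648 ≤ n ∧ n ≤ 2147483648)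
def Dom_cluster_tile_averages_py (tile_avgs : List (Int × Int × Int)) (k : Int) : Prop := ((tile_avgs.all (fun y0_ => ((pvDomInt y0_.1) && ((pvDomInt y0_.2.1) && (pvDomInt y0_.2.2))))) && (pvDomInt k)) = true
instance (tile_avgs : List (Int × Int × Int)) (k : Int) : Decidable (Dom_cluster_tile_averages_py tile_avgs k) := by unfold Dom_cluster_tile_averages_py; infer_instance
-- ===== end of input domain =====

-- B indexes the tiles once in a counter dict and runs the 7 center updates as weighted
-- Lloyd steps over the distinct colors only, then assigns labels in one final pass;
-- same results, much less work on duplicate-heavy tile lists.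


-- ===== PORT A =====
-- squared distance: sum((c[j]-p[j])**2 for j in range(3)), written component-wise
def pvD2A (c p : Int × Int × Int) : Int :=
  (c.1 - p.1) * (c.1 - p.1) + (c.2.1 - p.2.1) * (c.2.1 - p.2.1) + (c.2.2 - p.2.2) * (c.2.2 - p.2.2)

-- min(range(k), key=lambda i: dist2(c, centers[i])); k ≥ 1 at every call so .getD 0 is never used
def pvArgminA (centers : List (Int × Int × Int)) (c : Int × Int × Int) (k : Nat) : Int :=
  (PySem.List.min? (PySem.List.pyRange 0 (k : Int) 1)
    (fun i => pvD2A c (PySem.List.pyGetD centers i (0, 0, 0)))).getD 0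

-- inner assignment loop: groups[idx] = best; buckets[best].append(c)
def pvAssignA (centers : List (Int × Int × Int)) (k : Nat) :
    List (Int × Int × Int) → Nat → List Int → List (List (Int × Int × Int)) →
    List Int × List (List (Int × Int × Int))
  | [], _, groups, buckets => (groups, buckets)
  | c :: rest, idx, groups, buckets =>
    let best := pvArgminA centers c k
    let bn := best.toNat
    pvAssignA centers k rest (idx + 1) (groups.set idx best)
      (buckets.set bn (buckets.getD bn [] ++ [c]))

-- for i, bucket in enumerate(buckets): if bucket: centers[i] = tuple(sum // len); buckets has length k
def pvUpdateA (centers : List (Int × Int × Int)) (buckets : List (List (Int × Int × Int))) (k : Nat) :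
    List (Int × Int × Int) :=
  (List.range k).map (fun i =>
    let bucket := buckets.getD i []
    if bucket ≠ [] then
      (PySem.Int.floordiv (bucket.map (·.1)).sum (bucket.length : Int),
       PySem.Int.floordiv (bucket.map (·.2.1)).sum (bucket.length : Int),
       PySem.Int.floordiv (bucket.map (·.2.2)).sum (bucket.length : Int))
    else centers.getD i (0, 0, 0))

def pvStepA (pts : List (Int × Int × Int)) (k : Nat) (st : List Int × List (Int × Int × Int)) :
    List Int × List (Int × Int × Int) :=
  let r := pvAssignA st.2 k pts 0 st.1 (List.replicate k ([] : List (Int × Int × Int)))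
  (r.1, pvUpdateA st.2 r.2 k)

def cluster_tile_averages_py (tile_avgs : List (Int × Int × Int)) (k : Int) : List Int :=
  if tile_avgs = [] then []
  else
    let k2 : Int := max 1 (min k (tile_avgs.length : Int))
    let kn : Nat := k2.toNat
    let ordered := PySem.List.sorted tile_avgs (fun c => c.1 + c.2.1 + c.2.2)
    -- ordered[(i*(len-1)) // max(1,k-1)]: the index is provably in range, pyGetD's default is never used
    let centers := (List.range kn).map (fun i =>
      PySem.List.pyGetD ordered
        (PySem.Int.floordiv ((i : Int) * ((ordered.length : Int) - 1)) (max 1 (k2 - 1))) (0, 0, 0))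
    ((List.range 8).foldl (fun st _ => pvStepA tile_avgs kn st)
      (List.replicate tile_avgs.length (0 : Int), centers)).1

-- ===== PORT B =====
def pvD2B (c p : Int × Int × Int) : Int :=
  (c.1 - p.1) * (c.1 - p.1) + (c.2.1 - p.2.1) * (c.2.1 - p.2.1) + (c.2.2 - p.2.2) * (c.2.2 - p.2.2)

-- nearest(c, cs): explicit loop, best=0 then for i in range(1,k): keep strictly smaller distance
def pvNearest (cs : List (Int × Int × Int)) (c : Int × Int × Int) (k : Nat) : Int :=
  ((PySem.List.pyRange 1 (k : Int) 1).foldl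
    (fun st i =>
      let d := pvD2B c (PySem.List.pyGetD cs i (0, 0, 0))
      if d < st.2 then (i, d) else st)
    (0, pvD2B c (PySem.List.pyGetD cs 0 (0, 0, 0)))).1

-- for c, m in counts.items(): b = nearest(c, centers); sums[b] += (c*m, m)
def pvWPass (cen : List (Int × Int × Int)) (k : Nat) :
    List ((Int × Int × Int) × Int) → List (Int × Int × Int × Int) → List (Int × Int × Int × Int)
  | [], sums => sums
  | (c, m) :: rest, sums =>
    let b := (pvNearest cen c k).toNat
    let s := sums.getD b (0, 0, 0, 0)
    pvWPass cen k rest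
      (sums.set b (s.1 + c.1 * m, s.2.1 + c.2.1 * m, s.2.2.1 + c.2.2 * m, s.2.2.2 + m))

-- centers = [(s0//s3, s1//s3, s2//s3) if s3 else centers[i] for i, s in enumerate(sums)]; sums has length k
def pvUpdateW (cen : List (Int × Int × Int)) (sums : List (Int × Int × Int × Int)) (k : Nat) :
    List (Int × Int × Int) :=
  (List.range k).map (fun i =>
    let s := sums.getD i (0, 0, 0, 0)
    if s.2.2.2 ≠ 0 then
      (PySem.Int.floordiv s.1 s.2.2.2, PySem.Int.floordiv s.2.1 s.2.2.2,
       PySem.Int.floordiv s.2.2.1 s.2.2.2)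
    else cen.getD i (0, 0, 0))

def cluster_tile_averages_py_alt (tile_avgs : List (Int × Int × Int)) (k : Int) : List Int :=
  if tile_avgs = [] then []
  else
    let k2 : Int := max 1 (min k (tile_avgs.length : Int))
    let kn : Nat := k2.toNat
    let ordered := PySem.List.sorted tile_avgs (fun c => c.1 + c.2.1 + c.2.2)
    let centers := (List.range kn).map (fun i =>
      PySem.List.pyGetD ordered
        (PySem.Int.floordiv ((i : Int) * ((ordered.length : Int) - 1)) (max 1 (k2 - 1))) (0, 0, 0))
    -- counts = {}; for c in tile_avgs: counts[c] = counts.get(c, 0) + 1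
    let counts := tile_avgs.foldl (fun d c => d.insert c (d.getD c 0 + 1))
      (PySem.Dict.empty : PySem.Dict (Int × Int × Int) Int)
    -- 7 weighted updates over counts.items()
    let cen7 := (List.range 7).foldl
      (fun cen _ => pvUpdateW cen (pvWPass cen kn counts.items
        (List.replicate kn ((0, 0, 0, 0) : Int × Int × Int × Int))) kn) centers
    -- final labeling pass
    tile_avgs.map (fun c => pvNearest cen7 c kn)

-- ===== PRECONDITION & SPEC =====
def Spec_cluster_tile_averages_py (tile_avgs : List (Int × Int × Int)) (k : Int) (out : List Int) : Prop := out = cluster_tile_averages_py_alt tile_avgs k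
instance (tile_avgs : List (Int × Int × Int)) (k : Int) (out : List Int) : Decidable (Spec_cluster_tile_averages_py tile_avgs k out) := by unfold Spec_cluster_tile_averages_py; infer_instance

-- ===== CLAIM =====
def Claim_equal_cluster_tile_averages_py : Prop := ∀ (tile_avgs : List (Int × Int × Int)) (k : Int), Dom_cluster_tile_averages_py tile_avgs k → Spec_cluster_tile_averages_py tile_avgs k (cluster_tile_averages_py tile_avgs k)

-- ===== LEMMAS AND PROOFS =====

-- the running (best, bd) pair of B's explicit loop computes the first-minimum of min?
theorem pvFoldMin (f : Int → Int) :
    ∀ (l : List Int) (m : Int),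
      (l.foldl (fun st i => if f i < st.2 then (i, f i) else st) (m, f m)).1
        = (PySem.List.min? (m :: l) f).getD 0 := by
  intro l
  induction l with
  | nil => intro m; simp [PySem.List.min?]
  | cons x xs ih =>
    intro m
    have hmin : PySem.List.min? (m :: x :: xs) f
        = PySem.List.min? ((if f x < f m then x else m) :: xs) f := by
      simp only [PySem.List.min?, List.foldl_cons]
      by_cases h : f x < f m
      · simp [h]
      · simp [h]
    rw [List.foldl_cons, hmin]
    by_cases h : f x < f m
    · simp only [h, ite_true]
      exact ih x
    · simp only [h, ite_false]
      exact ih m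

theorem pvNearest_eq (cs : List (Int × Int × Int)) (c : Int × Int × Int) (k : Nat)
    (hk : 1 ≤ k) : pvNearest cs c k = pvArgminA cs c k := by
  have h01 : (0 : Int) < (k : Int) := by exact_mod_cast hk
  have hcons : PySem.List.pyRange 0 (k : Int) 1 = 0 :: PySem.List.pyRange 1 (k : Int) 1 := by
    simpa using PySem.List.pyRange_one_cons h01
  unfold pvNearest pvArgminA
  rw [hcons, show pvD2B = pvD2A from rfl]
  exact pvFoldMin (fun i => pvD2A c (PySem.List.pyGetD cs i (0, 0, 0)))
    (PySem.List.pyRange 1 (k : Int) 1) 0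

theorem pvArgminA_bounds (cs : List (Int × Int × Int)) (c : Int × Int × Int) (k : Nat)
    (hk : 1 ≤ k) : 0 ≤ pvArgminA cs c k ∧ pvArgminA cs c k < (k : Int) := by
  have h01 : (0 : Int) < (k : Int) := by exact_mod_cast hk
  cases hmin : PySem.List.min? (PySem.List.pyRange 0 (k : Int) 1)
      (fun i => pvD2A c (PySem.List.pyGetD cs i (0, 0, 0))) with
  | none =>
    have := (PySem.List.min?_eq_none_iff _ _).mp hmin
    rw [PySem.List.pyRange_one_cons h01] at this
    simp at this
  | some m =>
    have hm := PySem.List.min?_mem hmin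
    rw [PySem.List.mem_pyRange_one] at hm
    unfold pvArgminA
    rw [hmin]
    simpa using hm

theorem pvArgminA_toNat_lt (cs : List (Int × Int × Int)) (c : Int × Int × Int) (k : Nat)
    (hk : 1 ≤ k) : (pvArgminA cs c k).toNat < k := by
  have := pvArgminA_bounds cs c k hk
  omega

-- the filter of points assigned to cluster i, and the center-update both programs compute
def pvFilt (cen : List (Int × Int × Int)) (k : Nat) (pts : List (Int × Int × Int)) (i : Nat) :
    List (Int × Int × Int) :=
  pts.filter (fun c => (pvArgminA cen c k).toNat == i)

def pvSpecStep (pts : List (Int × Int × Int)) (k : Nat) (cen : List (Int × Int × Int)) :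
    List (Int × Int × Int) :=
  (List.range k).map (fun i =>
    let b := pvFilt cen k pts i
    if b ≠ [] then
      (PySem.Int.floordiv (b.map (·.1)).sum (b.length : Int),
       PySem.Int.floordiv (b.map (·.2.1)).sum (b.length : Int),
       PySem.Int.floordiv (b.map (·.2.2)).sum (b.length : Int))
    else cen.getD i (0, 0, 0))

theorem pvGetD_set {α : Type} (l : List α) (n i : Nat) (a d : α) (hn : n < l.length) :
    (l.set n a).getD i d = if n = i then a else l.getD i d := by
  simp only [List.getD, List.getElem?_set]
  split_ifs <;> simp_all

theorem pvSet_append {α : Type} (g : List α) (r0 : α) (rest : List α) (b : α) :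
    (g ++ r0 :: rest).set g.length b = (g ++ [b]) ++ rest := by
  induction g with
  | nil => simp
  | cons x xs ih => simp [ih]

-- A's assignment pass: groups become the argmin map, buckets collect the filters
theorem pvAssignA_char (cen : List (Int × Int × Int)) (k : Nat) (hk : 1 ≤ k) :
    ∀ (pts : List (Int × Int × Int)) (gd rest : List Int) (buckets : List (List (Int × Int × Int))),
      rest.length = pts.length → buckets.length = k →
      (pvAssignA cen k pts gd.length (gd ++ rest) buckets).1
          = gd ++ pts.map (fun c => pvArgminA cen c k)
        ∧ ∀ i : Nat, (pvAssignA cen k pts gd.length (gd ++ rest) buckets).2.getD i []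
          = buckets.getD i [] ++ pvFilt cen k pts i := by
  intro pts
  induction pts with
  | nil =>
    intro gd rest buckets h hb
    have : rest = [] := List.length_eq_zero_iff.mp h
    subst this
    simp [pvAssignA, pvFilt]
  | cons c pts ih =>
    intro gd rest buckets h hb
    cases rest with
    | nil => simp at h
    | cons r0 rest' =>
      have hlen : rest'.length = pts.length := by simpa using h
      simp only [pvAssignA]
      set best := pvArgminA cen c k with hbest
      have hbn : best.toNat < buckets.length := by rw [hb]; exact pvArgminA_toNat_lt cen c k hk
      have hset : (gd ++ r0 :: rest').set gd.length best = (gd ++ [best]) ++ rest' :=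
        pvSet_append gd r0 rest' best
      rw [hset]
      have hlb : (buckets.set best.toNat (buckets.getD best.toNat [] ++ [c])).length = k := by
        simpa using hb
      have hidx : gd.length + 1 = (gd ++ [best]).length := by simp
      rw [hidx]
      obtain ⟨ih1, ih2⟩ := ih (gd ++ [best]) rest'
        (buckets.set best.toNat (buckets.getD best.toNat [] ++ [c])) hlen hlb
      constructor
      · rw [ih1]; simp [← hbest]
      · intro i
        rw [ih2 i]
        rw [pvGetD_set _ _ _ _ _ hbn]
        unfold pvFilt
        by_cases hi : best.toNat = i
        · simp [← hbest, hi]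
        · have : ((pvArgminA cen c k).toNat == i) = false := by
            simp [← hbest]; omega
          simp [this, hi]

theorem pvGetD_replicate {α : Type} (n i : Nat) (a d : α) :
    (List.replicate n a).getD i d = if i < n then a else d := by
  simp only [List.getD, List.getElem?_replicate]
  split_ifs <;> simp_all

-- A's step is the spec step
theorem pvStepA_char (pts : List (Int × Int × Int)) (k : Nat) (hk : 1 ≤ k)
    (g : List Int) (hg : g.length = pts.length) (cen : List (Int × Int × Int)) :
    pvStepA pts k (g, cen) = (pts.map (fun c => pvArgminA cen c k), pvSpecStep pts k cen) := by
  obtain ⟨h1, h2⟩ := pvAssignA_char cen k hk pts [] g (List.replicate k []) (by simpa using hg)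
    (by simp)
  simp only [List.nil_append, List.length_nil] at h1 h2
  unfold pvStepA
  refine congrArg₂ Prod.mk h1 ?_
  unfold pvUpdateA pvSpecStep
  apply List.map_congr_left
  intro i hi
  have hrep : (List.replicate k ([] : List (Int × Int × Int))).getD i [] = [] := by
    rw [pvGetD_replicate]; split_ifs <;> rfl
  rw [h2 i, hrep, List.nil_append]

-- A's 8-iteration fold, characterized through iterates of the spec step
theorem pvFoldA (pts : List (Int × Int × Int)) (k : Nat) (hk : 1 ≤ k)
    (cen0 : List (Int × Int × Int)) :
    ∀ (t : Nat) (g : List Int), g.length = pts.length →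
      (List.range (t + 1)).foldl (fun st _ => pvStepA pts k st) (g, cen0)
        = (pts.map (fun c => pvArgminA ((pvSpecStep pts k)^[t] cen0) c k),
           (pvSpecStep pts k)^[t + 1] cen0) := by
  intro t
  induction t with
  | zero =>
    intro g hg
    simpa using pvStepA_char pts k hk g hg cen0
  | succ t ih =>
    intro g hg
    rw [List.range_succ, List.foldl_append, ih g hg]
    simp only [List.foldl_cons, List.foldl_nil]
    rw [pvStepA_char pts k hk _ (by simp) ((pvSpecStep pts k)^[t + 1] cen0)]
    simp [Function.iterate_succ_apply']

-- the four weighted sums over an items list for cluster i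
def pvWadd (cen : List (Int × Int × Int)) (k i : Nat) (items : List ((Int × Int × Int) × Int)) :
    Int × Int × Int × Int :=
  ((items.map (fun p => if (pvArgminA cen p.1 k).toNat == i then p.1.1 * p.2 else 0)).sum,
   (items.map (fun p => if (pvArgminA cen p.1 k).toNat == i then p.1.2.1 * p.2 else 0)).sum,
   (items.map (fun p => if (pvArgminA cen p.1 k).toNat == i then p.1.2.2 * p.2 else 0)).sum,
   (items.map (fun p => if (pvArgminA cen p.1 k).toNat == i then p.2 else 0)).sum)

-- B's weighted accumulation pass, characterized
theorem pvWPass_char (cen : List (Int × Int × Int)) (k : Nat) (hk : 1 ≤ k) :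
    ∀ (items : List ((Int × Int × Int) × Int)) (sums : List (Int × Int × Int × Int)),
      sums.length = k → ∀ i, i < k →
      (pvWPass cen k items sums).getD i (0, 0, 0, 0)
        = ((sums.getD i (0, 0, 0, 0)).1 + (pvWadd cen k i items).1,
           (sums.getD i (0, 0, 0, 0)).2.1 + (pvWadd cen k i items).2.1,
           (sums.getD i (0, 0, 0, 0)).2.2.1 + (pvWadd cen k i items).2.2.1,
           (sums.getD i (0, 0, 0, 0)).2.2.2 + (pvWadd cen k i items).2.2.2) := by
  intro items
  induction items with
  | nil => intro sums hs i hi; simp [pvWPass, pvWadd]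
  | cons p rest ih =>
    intro sums hs i hi
    obtain ⟨c, m⟩ := p
    simp only [pvWPass, pvNearest_eq cen c k hk]
    set bn := (pvArgminA cen c k).toNat with hbn
    have hbnk : bn < sums.length := by rw [hs]; exact pvArgminA_toNat_lt cen c k hk
    set s := sums.getD bn (0, 0, 0, 0) with hsd
    set sums' := sums.set bn (s.1 + c.1 * m, s.2.1 + c.2.1 * m, s.2.2.1 + c.2.2 * m, s.2.2.2 + m)
      with hsums'
    have hs' : sums'.length = k := by rw [hsums']; simpa using hs
    rw [ih sums' hs' i hi]
    have hget : sums'.getD i (0, 0, 0, 0)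
        = if bn = i then (s.1 + c.1 * m, s.2.1 + c.2.1 * m, s.2.2.1 + c.2.2 * m, s.2.2.2 + m)
          else sums.getD i (0, 0, 0, 0) := pvGetD_set sums bn i _ _ hbnk
    by_cases hbi : bn = i
    · have hbeq : ((pvArgminA cen c k).toNat == i) = true := by simp [← hbn, hbi]
      rw [hget, if_pos hbi]
      simp only [pvWadd, List.map_cons, List.sum_cons, hbeq, if_pos]
      subst hbi
      simp only [← hsd]
      refine congrArg₂ Prod.mk (by ring) (congrArg₂ Prod.mk (by ring)
        (congrArg₂ Prod.mk (by ring) (by ring)))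
    · have hbeq : ((pvArgminA cen c k).toNat == i) = false := by simp [← hbn]; omega
      rw [hget, if_neg hbi]
      simp only [pvWadd, List.map_cons, List.sum_cons, hbeq, if_neg, Bool.false_eq_true,
        not_false_iff, zero_add]

-- two lawful BEq instances agree
theorem pvBeqInst {α : Type} (i1 i2 : BEq α) (h1 : @LawfulBEq α i1) (h2 : @LawfulBEq α i2)
    (x v : α) : @BEq.beq α i1 x v = @BEq.beq α i2 x v := by
  by_cases h : x = v
  · subst h
    have e1 : @BEq.beq α i1 x x = true := (@beq_iff_eq α i1 h1 x x).mpr rfl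
    have e2 : @BEq.beq α i2 x x = true := (@beq_iff_eq α i2 h2 x x).mpr rfl
    rw [e1, e2]
  · cases hb1 : @BEq.beq α i1 x v
    · cases hb2 : @BEq.beq α i2 x v
      · rfl
      · exact absurd (@eq_of_beq α i2 h2 _ _ hb2) h
    · exact absurd (@eq_of_beq α i1 h1 _ _ hb1) h

theorem pvCountInst {α : Type} (i1 i2 : BEq α) (h1 : @LawfulBEq α i1) (h2 : @LawfulBEq α i2)
    (v : α) (l : List α) : @List.count α i1 v l = @List.count α i2 v l := by
  induction l with
  | nil => rfl
  | cons x xs ih =>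
    rw [@List.count_cons α i1, @List.count_cons α i2, ih, pvBeqInst i1 i2 h1 h2 x v]

-- weighted sum over the distinct elements equals the plain sum over the list
theorem pvWeightedSum (pts : List (Int × Int × Int)) (f : (Int × Int × Int) → Int) :
    ((PySem.Set.ofList pts).map (fun v => (pts.count v : Int) * f v)).sum
      = (pts.map f).sum := by
  have hc : ∀ (v : Int × Int × Int),
      List.count v pts = @List.count (Int × Int × Int) instBEqOfDecidableEq v pts :=
    fun v => pvCountInst _ _ inferInstance inferInstance v pts
  have hnd : (PySem.Set.ofList pts).Nodup := PySem.Set.nodup_ofList pts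
  have hfs : (PySem.Set.ofList pts).toFinset = pts.toFinset := by
    ext x
    simp [List.mem_toFinset, PySem.Set.mem_ofList]
  have h2 : ((PySem.Set.ofList pts).map (fun v => (pts.count v : Int) * f v)).sum
      = ∑ x ∈ (PySem.Set.ofList pts).toFinset, (pts.count x : Int) * f x :=
    (List.sum_toFinset _ hnd).symm
  rw [h2, hfs, Finset.sum_list_map_count]
  apply Finset.sum_congr rfl
  intro x _
  rw [← hc x, nsmul_eq_mul]

theorem pvSumIte {α : Type} (l : List α) (p : α → Bool) (g : α → Int) :
    (l.map (fun c => if p c then g c else 0)).sum = ((l.filter p).map g).sum := by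
  induction l with
  | nil => rfl
  | cons x xs ih =>
    by_cases h : p x <;> simp [h, ih]

-- the weighted sums over counter items are the bucket sums of the filter
theorem pvWadd_counter (cen : List (Int × Int × Int)) (k i : Nat)
    (pts : List (Int × Int × Int)) :
    pvWadd cen k i ((PySem.Set.ofList pts).map (fun v => (v, (pts.count v : Int))))
      = (((pvFilt cen k pts i).map (·.1)).sum,
         ((pvFilt cen k pts i).map (·.2.1)).sum,
         ((pvFilt cen k pts i).map (·.2.2)).sum,
         ((pvFilt cen k pts i).length : Int)) := by
  unfold pvWadd pvFilt
  simp only [List.map_map]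
  refine congrArg₂ Prod.mk ?_ (congrArg₂ Prod.mk ?_ (congrArg₂ Prod.mk ?_ ?_))
  · rw [← pvSumIte pts _ (·.1),
      ← pvWeightedSum pts (fun c => if (pvArgminA cen c k).toNat == i then c.1 else 0)]
    apply congrArg
    simp only [Function.comp_def, mul_ite, mul_zero, mul_one, mul_comm]
  · rw [← pvSumIte pts _ (·.2.1),
      ← pvWeightedSum pts (fun c => if (pvArgminA cen c k).toNat == i then c.2.1 else 0)]
    apply congrArg
    simp only [Function.comp_def, mul_ite, mul_zero, mul_one, mul_comm]
  · rw [← pvSumIte pts _ (·.2.2),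
      ← pvWeightedSum pts (fun c => if (pvArgminA cen c k).toNat == i then c.2.2 else 0)]
    apply congrArg
    simp only [Function.comp_def, mul_ite, mul_zero, mul_one, mul_comm]
  · have hlen : ((pts.filter (fun c => (pvArgminA cen c k).toNat == i)).length : Int)
        = (pts.map (fun c => if (pvArgminA cen c k).toNat == i then (1 : Int) else 0)).sum := by
      rw [pvSumIte pts _ (fun _ => (1 : Int))]
      simp [List.map_const]
    rw [hlen,
      ← pvWeightedSum pts (fun c => if (pvArgminA cen c k).toNat == i then (1 : Int) else 0)]
    apply congrArg
    simp only [Function.comp_def, mul_ite, mul_zero, mul_one, mul_comm]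

-- B's step is the spec step
theorem pvStepW_char (pts : List (Int × Int × Int)) (k : Nat) (hk : 1 ≤ k)
    (cen : List (Int × Int × Int)) :
    pvUpdateW cen
        (pvWPass cen k
          ((pts.foldl (fun d c => d.insert c (d.getD c 0 + 1))
            (PySem.Dict.empty : PySem.Dict (Int × Int × Int) Int)).items)
          (List.replicate k ((0, 0, 0, 0) : Int × Int × Int × Int))) k
      = pvSpecStep pts k cen := by
  rw [PySem.Dict.foldl_insert_getD_add_one_eq_counter, PySem.Dict.items_counter]
  unfold pvUpdateW pvSpecStep
  apply List.map_congr_left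
  intro i hi
  have hik : i < k := List.mem_range.mp hi
  rw [pvWPass_char cen k hk _ _ (by simp) i hik]
  rw [pvWadd_counter cen k i pts]
  have hrep : (List.replicate k ((0, 0, 0, 0) : Int × Int × Int × Int)).getD i (0, 0, 0, 0)
      = (0, 0, 0, 0) := by
    rw [pvGetD_replicate]; split_ifs <;> rfl
  rw [hrep]
  simp only [zero_add]
  have hcond : (((pvFilt cen k pts i).length : Int) ≠ 0) ↔ (pvFilt cen k pts i ≠ []) := by
    rw [not_iff_not]
    simp [Int.natCast_eq_zero, List.length_eq_zero_iff]
  by_cases hb : pvFilt cen k pts i = []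
  · rw [if_neg (by simpa [hcond] using hb), if_neg (by simpa using hb)]
  · rw [if_pos (hcond.mpr hb), if_pos hb]

-- B's 7-iteration fold
theorem pvFoldB (pts : List (Int × Int × Int)) (k : Nat) (hk : 1 ≤ k)
    (cen0 : List (Int × Int × Int)) (counts : PySem.Dict (Int × Int × Int) Int)
    (hc : counts = pts.foldl (fun d c => d.insert c (d.getD c 0 + 1)) PySem.Dict.empty) :
    ∀ t : Nat,
      (List.range t).foldl
        (fun cen _ => pvUpdateW cen (pvWPass cen k counts.items
          (List.replicate k ((0, 0, 0, 0) : Int × Int × Int × Int))) k) cen0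
        = (pvSpecStep pts k)^[t] cen0 := by
  intro t
  induction t with
  | zero => simp
  | succ t ih =>
    rw [List.range_succ, List.foldl_append, ih]
    simp only [List.foldl_cons, List.foldl_nil]
    rw [hc, pvStepW_char pts k hk]
    rw [Function.iterate_succ_apply']

-- ===== VERDICT =====
theorem cluster_tile_averages_py_spec : Claim_equal_cluster_tile_averages_py := by
  intro tile_avgs k _
  unfold Spec_cluster_tile_averages_py cluster_tile_averages_py cluster_tile_averages_py_alt
  by_cases h : tile_avgs = []
  · simp [h]
  · simp only [h, if_false]
    have hk : 1 ≤ (max 1 (min k (tile_avgs.length : Int))).toNat := by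
      have : (1 : Int) ≤ max 1 (min k (tile_avgs.length : Int)) := le_max_left _ _
      omega
    set kn := (max 1 (min k (tile_avgs.length : Int))).toNat
    set cen0 := (List.range kn).map (fun i =>
      PySem.List.pyGetD (PySem.List.sorted tile_avgs (fun c => c.1 + c.2.1 + c.2.2))
        (PySem.Int.floordiv ((i : Int) *
          (((PySem.List.sorted tile_avgs (fun c => c.1 + c.2.1 + c.2.2)).length : Int) - 1))
          (max 1 ((max 1 (min k (tile_avgs.length : Int))) - 1))) (0, 0, 0)) with hcen0
    have hA := pvFoldA tile_avgs kn hk cen0 7 (List.replicate tile_avgs.length 0) (by simp)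
    have hB := pvFoldB tile_avgs kn hk cen0 _ rfl 7
    rw [show (7 + 1) = 8 from rfl] at hA
    rw [hA, hB]
    apply List.map_congr_left
    intro c _
    exact (pvNearest_eq _ c kn hk).symm
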